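-- pv_equiv track=rewrite | github.com/Nicky027/advent-of-code | advent_of_code_2021/day_10/syntax_v2.py | find_errors_and_completions
-- ===== SOURCE A (Python) =====
-- def find_errors_and_completions(inputs):
--     errors = []
--     completions = []
--     for input in inputs:
--         error = find_error(input)
--         if error:
--             errors.append(error)
--         else:
--             completions.append(find_completion(input))
--     return errors, completions
--
-- def find_error(input):
--     open_brackets = []
--     for x in input:
--         if x in ["(", "[", "{", "<"]:
--             open_brackets.append(x)
--         else:
--             y = open_brackets.pop()
--             if close_bracket(y) != x:
--                 return x
--
-- def find_completion(input):
--     open_brackets = []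
--     for x in input:
--         if x in ["(", "[", "{", "<"]:
--             open_brackets.append(x)
--         else:
--             open_brackets.pop()
--     open_brackets.reverse()
--     return [close_bracket(x) for x in open_brackets]
--
-- def close_bracket(opened_bracket):
--     return {"(": ")", "{": "}", "[": "]", "<": ">"}[opened_bracket]
-- ===== SOURCE B (Python) =====
-- def find_errors_and_completions(inputs):
--     pairs = {"(": ")", "[": "]", "{": "}", "<": ">"}
--     errors = []
--     completions = []
--     for line in inputs:
--         stack = []
--         for x in line:
--             if x in pairs:
--                 stack.append(pairs[x])  # push the expected closer directly
--             else:
--                 expected = stack.pop()  # unguarded: IndexError on underflow, as in A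
--                 if expected != x:
--                     errors.append(x)
--                     break
--         else:
--             completions.append(list(reversed(stack)))
--     return errors, completions
-- ===== Notes on version B (the rewrite author's own statement) =====
-- stated objective: alternative
-- what changed: B makes a single stack pass per line that pushes the expected closing bracket directly and records the error or the completion in the same scan, replacing A's two separate scans (find_error, then find_completion) and its per-opener mapping of the leftover stack.
import Mathlib
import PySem

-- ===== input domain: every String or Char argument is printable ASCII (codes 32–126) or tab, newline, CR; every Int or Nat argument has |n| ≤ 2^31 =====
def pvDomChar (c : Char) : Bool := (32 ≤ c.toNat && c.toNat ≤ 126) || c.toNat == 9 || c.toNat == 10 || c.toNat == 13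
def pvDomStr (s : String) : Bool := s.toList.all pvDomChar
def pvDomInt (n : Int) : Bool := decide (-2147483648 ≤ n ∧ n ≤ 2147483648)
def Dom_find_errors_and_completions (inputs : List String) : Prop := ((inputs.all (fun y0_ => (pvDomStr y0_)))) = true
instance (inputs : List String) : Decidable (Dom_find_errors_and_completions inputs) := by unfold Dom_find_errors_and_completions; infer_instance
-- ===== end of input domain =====

-- ===== PORT A =====
-- B merges A's two per-line scans into one pass that pushes expected closers directly. (alternative)
-- A-side helpers: literal transliteration of find_error / find_completion / close_bracket.
def pvCloseB (c : Char) : Char :=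
  if c = '(' then ')' else if c = '{' then '}' else if c = '[' then ']'
  else if c = '<' then '>' else ' '  -- Python raises KeyError here; unreachable (stack holds only openers)

def pvIsOpen (c : Char) : Bool := decide (c = '(' ∨ c = '[' ∨ c = '{' ∨ c = '<')

def pvFindErrorLoop : List Char → List Char → Option Char
  | [], _ => none
  | x :: xs, st =>
    if pvIsOpen x then pvFindErrorLoop xs (x :: st)
    else
      match st with
      | [] => none  -- Python raises IndexError here; excluded by Pre_
      | y :: st' => if pvCloseB y ≠ x then some x else pvFindErrorLoop xs st'

def pvFindCompletionLoop : List Char → List Char → List Char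
  | [], st => st
  | x :: xs, st =>
    if pvIsOpen x then pvFindCompletionLoop xs (x :: st)
    else
      match st with
      | [] => pvFindCompletionLoop xs []  -- Python raises IndexError here; excluded by Pre_
      | _ :: st' => pvFindCompletionLoop xs st'

def pvFindCompletion (l : List Char) : List String :=
  -- the Lean cons-stack is Python's list already reversed, so Python's .reverse() is the identity here
  (pvFindCompletionLoop l []).map (fun c => String.ofList [pvCloseB c])

def pvStepA (acc : List String × List (List String)) (line : String) :
    List String × List (List String) :=
  match pvFindErrorLoop line.toList [] with
  | some e => (acc.1 ++ [String.ofList [e]], acc.2)   -- error is a 1-char string, always truthy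
  | none => (acc.1, acc.2 ++ [pvFindCompletion line.toList])

def find_errors_and_completions (inputs : List String) : List String × List (List String) :=
  inputs.foldl pvStepA ([], [])

-- ===== PORT B =====
-- pairs[x] lookup combined with the 'x in pairs' membership test
def pvCloserOf? (c : Char) : Option Char :=
  if c = '(' then some ')' else if c = '[' then some ']'
  else if c = '{' then some '}' else if c = '<' then some '>' else none

-- one pass: .inl = error char (break), .inr = leftover stack of expected closers (for/else)
def pvScanAlt : List Char → List Char → Sum Char (List Char)
  | [], st => .inr st
  | x :: xs, st =>
    match pvCloserOf? x with
    | some cl => pvScanAlt xs (cl :: st)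
    | none =>
      match st with
      | [] => .inl x  -- Python raises IndexError here; excluded by Pre_
      | e :: st' => if e ≠ x then .inl x else pvScanAlt xs st'

def pvStepB (acc : List String × List (List String)) (line : String) :
    List String × List (List String) :=
  match pvScanAlt line.toList [] with
  | .inl e => (acc.1 ++ [String.ofList [e]], acc.2)
  | .inr st => (acc.1, acc.2 ++ [st.map (fun c => String.ofList [c])])  -- cons-stack = list(reversed(stack))

def find_errors_and_completions_alt (inputs : List String) : List String × List (List String) :=
  inputs.foldl pvStepB ([], [])

-- ===== PRECONDITION & SPEC =====
-- Pre_ excludes exactly the inputs on which A raises IndexError: a line popping an empty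
-- stack before any mismatch has been found (both A and B raise there).
def pvLineSafe : List Char → List Char → Bool
  | [], _ => true
  | x :: xs, st =>
    match pvCloserOf? x with
    | some cl => pvLineSafe xs (cl :: st)
    | none =>
      match st with
      | [] => false
      | e :: st' => if e ≠ x then true else pvLineSafe xs st'

def Pre_find_errors_and_completions (inputs : List String) : Prop :=
  ∀ l ∈ inputs, pvLineSafe l.toList [] = true
instance (inputs : List String) : Decidable (Pre_find_errors_and_completions inputs) := by
  unfold Pre_find_errors_and_completions; infer_instance

def pvWitness_find_errors_and_completions : List String := ["([<{", "(]", "(())", ""]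

def Spec_find_errors_and_completions (inputs : List String) (out : List String × List (List String)) : Prop := out = find_errors_and_completions_alt inputs
instance (inputs : List String) (out : List String × List (List String)) : Decidable (Spec_find_errors_and_completions inputs out) := by unfold Spec_find_errors_and_completions; infer_instance

-- ===== CLAIM (what is proved, stated in full; the proofs are below) =====
def Claim_equal_find_errors_and_completions : Prop := ∀ (inputs : List String), Dom_find_errors_and_completions inputs → Pre_find_errors_and_completions inputs → Spec_find_errors_and_completions inputs (find_errors_and_completions inputs)

-- ===== LEMMAS AND PROOFS =====

lemma pvCloserOf?_eq (x : Char) :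
    pvCloserOf? x = if pvIsOpen x then some (pvCloseB x) else none := by
  by_cases h1 : x = '(' <;> by_cases h2 : x = '[' <;> by_cases h3 : x = '{' <;>
    by_cases h4 : x = '<' <;> simp [pvCloserOf?, pvIsOpen, pvCloseB, h1, h2, h3, h4]

-- on a safe line, B's single scan returns A's error, or A's leftover stack mapped to closers
lemma pvScanAlt_key (cs : List Char) : ∀ st : List Char,
    pvLineSafe cs (st.map pvCloseB) = true →
    pvScanAlt cs (st.map pvCloseB) =
      (match pvFindErrorLoop cs st with
       | some e => .inl e
       | none => .inr ((pvFindCompletionLoop cs st).map pvCloseB)) := by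
  induction cs with
  | nil => intro st _; simp [pvScanAlt, pvFindErrorLoop, pvFindCompletionLoop]
  | cons x xs ih =>
    intro st hsafe
    by_cases hop : pvIsOpen x
    · have hc : pvCloserOf? x = some (pvCloseB x) := by simp [pvCloserOf?_eq, hop]
      have hsafe' : pvLineSafe xs (pvCloseB x :: st.map pvCloseB) = true := by
        simpa [pvLineSafe, hc] using hsafe
      have hih := ih (x :: st) (by simpa using hsafe')
      simp only [List.map_cons] at hih
      simpa [pvScanAlt, pvFindErrorLoop, pvFindCompletionLoop, hc, hop] using hih
    · have hc : pvCloserOf? x = none := by simp [pvCloserOf?_eq, hop]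
      cases st with
      | nil => simp [pvLineSafe, hc] at hsafe
      | cons y st' =>
        by_cases hm : pvCloseB y = x
        · have hsafe' : pvLineSafe xs (st'.map pvCloseB) = true := by
            simpa [pvLineSafe, hc, hm] using hsafe
          simpa [pvScanAlt, pvFindErrorLoop, pvFindCompletionLoop, hc, hop, hm] using
            ih st' hsafe'
        · simp [pvScanAlt, pvFindErrorLoop, hc, hop, hm]

lemma pvStep_eq (acc : List String × List (List String)) (l : String)
    (h : pvLineSafe l.toList [] = true) : pvStepA acc l = pvStepB acc l := by
  have k := pvScanAlt_key l.toList [] (by simpa using h)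
  simp only [List.map_nil] at k
  unfold pvStepA pvStepB
  cases hE : pvFindErrorLoop l.toList [] with
  | some e => rw [hE] at k; simp [k]
  | none =>
    rw [hE] at k
    simp [k, pvFindCompletion, List.map_map, Function.comp]

lemma pvFoldl_eq : ∀ (inputs : List String) (acc : List String × List (List String)),
    (∀ l ∈ inputs, pvLineSafe l.toList [] = true) →
    inputs.foldl pvStepA acc = inputs.foldl pvStepB acc := by
  intro inputs
  induction inputs with
  | nil => intro acc _; rfl
  | cons l ls ih =>
    intro acc h
    simp only [List.foldl_cons]
    rw [pvStep_eq acc l (h l (by simp))]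
    exact ih _ (fun m hm => h m (by simp [hm]))

-- ===== VERDICT (by name: the statement is the Claim_ definition above) =====
theorem find_errors_and_completions_spec : Claim_equal_find_errors_and_completions := by
  intro inputs _ hpre
  show find_errors_and_completions inputs = find_errors_and_completions_alt inputs
  exact pvFoldl_eq inputs ([], []) hpre
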